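-- pv_equiv track=rewrite | github.com/khaledidk/Internet-Queries | tolerant return/TolerantIndexReader.py | convert_token_to_bigram
-- ===== SOURCE A (Python) =====
-- def convert_token_to_bigram(token):
--     list_of_bigrams = []
--     last_index = 2
--     bigram = '$'
--     bigram += token[0: 1]
--     list_of_bigrams.append(bigram)
--
--     for first_index in range(len(token)-1):
--         bigram = ''
--         bigram += token[first_index : last_index]
--         list_of_bigrams.append(bigram)
--         last_index+=1
--     if(len(token) >= 1):
--        list_of_bigrams.append(token[len(token)-1 : ] + '$')
--     return list_of_bigrams
-- ===== SOURCE B (Python) =====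
-- def convert_token_to_bigram(token):
--     padded = '$' + token + '$'
--     return [padded[i:i + 2] for i in range(len(padded) - 1)]
-- ===== Notes on version B (the rewrite author's own statement) =====
-- stated objective: simpler
-- what changed: Replaces A's three-part construction (special-cased first bigram, an index loop with a separately maintained last_index counter, special-cased final bigram) by one uniform length-2 sliding window over the sentinel-padded token.
-- intended difference: On the empty token A returns a one-element list holding only the front sentinel character (an accident of its unconditional first append), while B returns the one bigram made of the two sentinel characters, the intended padded-window value. — e.g. on convert_token_to_bigram(""): A returns ["$"], B returns ["$$"]
import Mathlib
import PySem

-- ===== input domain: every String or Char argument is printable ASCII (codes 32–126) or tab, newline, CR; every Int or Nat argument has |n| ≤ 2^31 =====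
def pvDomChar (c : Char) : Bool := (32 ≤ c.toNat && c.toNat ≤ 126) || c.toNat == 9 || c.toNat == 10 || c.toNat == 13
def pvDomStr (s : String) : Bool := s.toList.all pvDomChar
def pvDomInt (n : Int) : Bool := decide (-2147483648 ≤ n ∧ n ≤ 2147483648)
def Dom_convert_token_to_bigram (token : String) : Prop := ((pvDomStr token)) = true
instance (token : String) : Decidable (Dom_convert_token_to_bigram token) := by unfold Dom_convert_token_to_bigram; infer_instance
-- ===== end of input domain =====

-- B replaces A's three-part construction (first bigram, index loop with a separate
-- last_index counter, last bigram) by one sliding window over the sentinel-padded token;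
-- on the empty token their values differ as stated in D_ below. Objective: simpler.

-- ===== PORT A =====
def convert_token_to_bigram (token : String) : List String :=
  let cs := token.toList
  let bigram : List Char := ['$'] ++ PySem.List.slice cs (some 0) (some 1)
  let lob : List String := [String.ofList bigram]
  -- loop state = (list_of_bigrams, last_index), last_index starts at 2
  let st := (PySem.List.pyRange 0 ((cs.length : Int) - 1) 1).foldl
    (fun (st : List String × Int) fi =>
      (st.1 ++ [String.ofList (PySem.List.slice cs (some fi) (some st.2))], st.2 + 1))
    (lob, 2)
  if (cs.length : Int) ≥ 1 then
    st.1 ++ [String.ofList (PySem.List.slice cs (some ((cs.length : Int) - 1)) none ++ ['$'])]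
  else st.1

-- ===== PORT B =====
def convert_token_to_bigram_alt (token : String) : List String :=
  let padded : List Char := '$' :: token.toList ++ ['$']
  (PySem.List.pyRange 0 ((padded.length : Int) - 1) 1).map
    (fun i => String.ofList (PySem.List.slice padded (some i) (some (i + 2))))

-- ===== PRECONDITION & SPEC =====
-- On the empty token A returns a one-element list holding only the front sentinel character (an accident of its unconditional first append), while B returns the one bigram made of the two sentinel characters, the intended padded-window value.
def D_convert_token_to_bigram (token : String) : Prop := token = ""
instance (token : String) : Decidable (D_convert_token_to_bigram token) := by unfold D_convert_token_to_bigram; infer_instance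
def Spec_convert_token_to_bigram (token : String) (out : List String) : Prop := ¬ D_convert_token_to_bigram token → out = convert_token_to_bigram_alt token
instance (token : String) (out : List String) : Decidable (Spec_convert_token_to_bigram token out) := by unfold Spec_convert_token_to_bigram; infer_instance
def pvDiffWitness_convert_token_to_bigram : String := ""
def pvDiffWitnessOut_convert_token_to_bigram : (List String) × (List String) := (["$"], ["$$"])

-- ===== CLAIM (what is proved, stated in full; the proofs are below) =====
def Claim_unchanged_convert_token_to_bigram : Prop := ∀ (token : String), Dom_convert_token_to_bigram token → Spec_convert_token_to_bigram token (convert_token_to_bigram token)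
def Claim_changed_convert_token_to_bigram : Prop := Dom_convert_token_to_bigram (pvDiffWitness_convert_token_to_bigram) ∧ D_convert_token_to_bigram (pvDiffWitness_convert_token_to_bigram) ∧ convert_token_to_bigram (pvDiffWitness_convert_token_to_bigram) = pvDiffWitnessOut_convert_token_to_bigram.1 ∧ convert_token_to_bigram_alt (pvDiffWitness_convert_token_to_bigram) = pvDiffWitnessOut_convert_token_to_bigram.2 ∧ pvDiffWitnessOut_convert_token_to_bigram.1 ≠ pvDiffWitnessOut_convert_token_to_bigram.2
def Claim_exact_convert_token_to_bigram : Prop := ∀ (token : String), Dom_convert_token_to_bigram token → D_convert_token_to_bigram token → convert_token_to_bigram token ≠ convert_token_to_bigram_alt token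

-- ===== LEMMAS AND PROOFS =====

-- A's loop: the separately maintained last_index always equals first_index + 2.
lemma foldA_eq_map (cs : List Char) :
    ∀ (n : Nat) (a : Int) (acc : List String),
    ((PySem.List.pyRange a (a + n) 1).foldl
      (fun (st : List String × Int) fi =>
        (st.1 ++ [String.ofList (PySem.List.slice cs (some fi) (some st.2))], st.2 + 1))
      (acc, a + 2)).1
    = acc ++ (PySem.List.pyRange a (a + n) 1).map
        (fun fi => String.ofList (PySem.List.slice cs (some fi) (some (fi + 2)))) := by
  intro n
  induction n with
  | zero => intro a acc; rw [PySem.List.pyRange_one_eq_nil (by omega)]; simp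
  | succ k ih =>
    intro a acc
    rw [PySem.List.pyRange_one_cons (by omega)]
    push_cast
    have h1 : a + (↑k + 1) = (a + 1) + ↑k := by ring
    simp only [List.foldl_cons, List.map_cons, h1]
    have := ih (a + 1) (acc ++ [String.ofList (PySem.List.slice cs (some a) (some (a + 2)))])
    have h2 : a + 2 + 1 = (a + 1) + 2 := by ring
    rw [h2]
    rw [this]
    simp

-- window-arithmetic facts, stated on plain lists
lemma slice_window {α : Type} (xs : List α) (k : Nat) :
    PySem.List.slice xs (some (k : Int)) (some ((k : Int) + 2)) = (xs.drop k).take 2 := by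
  simpa using PySem.List.slice_natCast_add xs k 2

lemma take_two_mid (cs : List Char) (k : Nat) (hk : k + 2 ≤ cs.length) :
    ((cs ++ ['$']).drop k).take 2 = (cs.drop k).take 2 := by
  rw [List.drop_append_of_le_length (by omega),
      List.take_append_of_le_length (by simp; omega)]

theorem convert_token_to_bigram_spec : Claim_unchanged_convert_token_to_bigram := by
  intro token _hdom hD
  have hne : token.toList ≠ [] := by
    intro h
    exact hD (String.toList_eq_nil_iff.mp h)
  obtain ⟨c, rest, hcr⟩ := List.exists_cons_of_ne_nil hne
  simp only [convert_token_to_bigram, convert_token_to_bigram_alt, hcr]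
  set m := rest.length with hm
  have hlen : ((c :: rest).length : Int) = (m : Int) + 1 := by simp [hm]
  have hf := foldA_eq_map (c :: rest) m 0
    [String.ofList (['$'] ++ PySem.List.slice (c :: rest) (some 0) (some 1))]
  simp only [zero_add] at hf
  rw [hlen, show (m:Int) + 1 - 1 = (m:Int) by ring, hf, if_pos (by omega)]
  rw [show (('$' :: c :: rest ++ ['$']).length : Int) - 1 = ((m + 2 : Nat) : Int) by
        simp [hm]; push_cast; ring]
  rw [PySem.List.pyRange_zero_nat m, PySem.List.pyRange_zero_nat (m + 2), List.map_map, List.map_map]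
  simp only [Function.comp_def, slice_window]
  rw [PySem.List.slice_from (c :: rest) (by omega : (0:Int) ≤ (m:Int))]
  rw [show PySem.List.slice (c :: rest) (some 0) (some 1) = [c] by
        simpa using PySem.List.slice_natCast_add (c :: rest) 0 1]
  simp only [Int.toNat_natCast]
  rw [show m + 2 = (m + 1) + 1 from rfl, List.range_succ, List.map_append,
      List.range_succ_eq_map, List.map_cons, List.map_map]
  simp
  refine ⟨fun a ha => ?_, ?_⟩
  · rw [show c :: (rest ++ ['$']) = (c :: rest) ++ ['$'] from rfl,
        take_two_mid (c :: rest) a (by simp; omega)]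
  · rw [show c :: (rest ++ ['$']) = (c :: rest) ++ ['$'] from rfl,
        List.drop_append_of_le_length (by simp [hm]),
        List.take_of_length_le (by simp [hm])]
    simp

theorem convert_token_to_bigram_changed : Claim_changed_convert_token_to_bigram := by
  unfold Claim_changed_convert_token_to_bigram; decide

theorem convert_token_to_bigram_tight : Claim_exact_convert_token_to_bigram := by
  intro token _ hD
  subst hD
  decide
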